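-- pv_equiv track=rewrite | github.com/rickvanderwolk/led-matrix | modes/clock-4/main.py | get_outer_ring_positions
-- ===== SOURCE A (Python) =====
-- def get_outer_ring_positions(quadrant):
--     """
--     Get the 12 outer ring positions for a quadrant as LED indices.
--     Quadrant: 0=top-left, 1=top-right, 2=bottom-left, 3=bottom-right
--     Returns list of LED indices in clockwise order like a clock
--     """
--     # Base coordinates for each quadrant (top-left corner)
--     base_x = (quadrant % 2) * 4
--     base_y = (quadrant // 2) * 4
--
--     # Manually define the 12 positions clockwise for each quadrant
--     # We'll convert to LED indices directly
--     positions = []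
--
--     # Top row (y=0): 4 positions, left to right
--     for x in range(4):
--         positions.append(xy_to_led_index(base_x + x, base_y))
--
--     # Right column (x=3): 3 positions going down (y=1,2,3)
--     for y in range(1, 4):
--         positions.append(xy_to_led_index(base_x + 3, base_y + y))
--
--     # Bottom row (y=3): 3 positions going left (x=2,1,0)
--     for x in range(2, -1, -1):
--         positions.append(xy_to_led_index(base_x + x, base_y + 3))
--
--     # Left column (x=0): 2 positions going up (y=2,1)
--     for y in range(2, 0, -1):
--         positions.append(xy_to_led_index(base_x, base_y + y))
--
--     return positions
--
-- def xy_to_led_index(x, y):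
--     """
--     Convert x,y coordinates to LED index.
--     Linear layout: left to right, top to bottom (like reading a book)
--     Row 0: 0-7 (left to right)
--     Row 1: 8-15 (left to right)
--     Row 2: 16-23 (left to right)
--     etc.
--     """
--     return y * 8 + x
-- ===== SOURCE B (Python) =====
-- # Single base index plus a fixed clockwise ring-offset table (no edge-tracing loops).
-- _RING_OFFSETS = [0, 1, 2, 3, 11, 19, 27, 26, 25, 24, 16, 8]
--
-- def get_outer_ring_positions(quadrant):
--     base = (quadrant // 2) * 32 + (quadrant % 2) * 4
--     return [base + off for off in _RING_OFFSETS]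
-- ===== Notes on version B (the rewrite author's own statement) =====
-- stated objective: simpler
-- what changed: Replaces four edge-tracing range loops with per-point coordinate-to-index conversion by one base index computation plus a fixed clockwise ring-offset table and a single map.
import Mathlib
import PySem

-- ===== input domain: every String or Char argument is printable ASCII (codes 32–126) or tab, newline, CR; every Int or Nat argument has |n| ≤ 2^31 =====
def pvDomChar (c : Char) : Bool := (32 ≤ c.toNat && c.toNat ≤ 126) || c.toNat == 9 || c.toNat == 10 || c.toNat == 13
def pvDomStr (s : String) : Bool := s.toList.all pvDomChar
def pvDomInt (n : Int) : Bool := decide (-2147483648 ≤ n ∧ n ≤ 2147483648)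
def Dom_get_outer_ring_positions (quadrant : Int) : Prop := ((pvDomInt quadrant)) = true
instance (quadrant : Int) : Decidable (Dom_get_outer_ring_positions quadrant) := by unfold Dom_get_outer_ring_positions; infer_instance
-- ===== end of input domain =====

-- B replaces A's four edge-tracing loops with one base index plus a fixed clockwise ring-offset table (simpler decomposition).
-- ===== PORT A =====
def xy_to_led_index (x y : Int) : Int := y * 8 + x

def get_outer_ring_positions (quadrant : Int) : List Int :=
  let base_x := (PySem.Int.mod quadrant 2) * 4
  let base_y := (PySem.Int.floordiv quadrant 2) * 4
  let positions : List Int := []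
  -- top row
  let positions := (PySem.List.pyRange 0 4 1).foldl
    (fun acc x => acc ++ [xy_to_led_index (base_x + x) base_y]) positions
  -- right column
  let positions := (PySem.List.pyRange 1 4 1).foldl
    (fun acc y => acc ++ [xy_to_led_index (base_x + 3) (base_y + y)]) positions
  -- bottom row
  let positions := (PySem.List.pyRange 2 (-1) (-1)).foldl
    (fun acc x => acc ++ [xy_to_led_index (base_x + x) (base_y + 3)]) positions
  -- left column
  let positions := (PySem.List.pyRange 2 0 (-1)).foldl
    (fun acc y => acc ++ [xy_to_led_index base_x (base_y + y)]) positions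
  positions

-- ===== PORT B =====
def ringOffsets : List Int := [0, 1, 2, 3, 11, 19, 27, 26, 25, 24, 16, 8]

def get_outer_ring_positions_alt (quadrant : Int) : List Int :=
  let base := (PySem.Int.floordiv quadrant 2) * 32 + (PySem.Int.mod quadrant 2) * 4
  ringOffsets.map (fun off => base + off)

-- ===== PRECONDITION & SPEC =====
def Spec_get_outer_ring_positions (quadrant : Int) (out : List Int) : Prop := out = get_outer_ring_positions_alt quadrant
instance (quadrant : Int) (out : List Int) : Decidable (Spec_get_outer_ring_positions quadrant out) := by unfold Spec_get_outer_ring_positions; infer_instance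

-- ===== CLAIM (what is proved, stated in full; the proofs are below) =====
def Claim_equal_get_outer_ring_positions : Prop := ∀ (quadrant : Int), Dom_get_outer_ring_positions quadrant → Spec_get_outer_ring_positions quadrant (get_outer_ring_positions quadrant)

-- ===== LEMMAS AND PROOFS =====

-- ===== VERDICT (by name: the statement is the Claim_ definition above) =====
theorem get_outer_ring_positions_spec : Claim_equal_get_outer_ring_positions := by
  intro q _
  unfold Spec_get_outer_ring_positions get_outer_ring_positions get_outer_ring_positions_alt
    ringOffsets xy_to_led_index
  simp [PySem.List.pyRange, List.range_succ]
  omega
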